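-- pv_equiv track=rewrite | github.com/Mblshko/Codewars_Python_Solutions | 5kyu/String incrementer.py | increment_string
-- ===== SOURCE A (Python) =====
-- def increment_string(strng):
--     letters = ''
--     numbers = ''
--     for x in strng:
--         if x.isdigit():
--             numbers += x
--         else:
--             letters += numbers + x
--             numbers = ''
--     i = len(numbers)
--     if i == 0:
--         return(letters + '1')
--     else:
--         result = int(numbers) + 1
--         return(letters + format(result, f'0{i}d'))
-- ===== SOURCE B (Python) =====
-- def increment_string(strng):
--     head = strng.rstrip('0123456789')
--     tail = strng[len(head):]
--     if not tail:
--         return head + '1'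
--     return head + format(int(tail) + 1, f'0{len(tail)}d')
-- ===== Notes on version B (the rewrite author's own statement) =====
-- stated objective: faster
-- what changed: B strips the trailing digit run from the right (rstrip + slice) instead of A's forward scan that re-accumulates every digit run with repeated string concatenation.
import Mathlib
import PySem

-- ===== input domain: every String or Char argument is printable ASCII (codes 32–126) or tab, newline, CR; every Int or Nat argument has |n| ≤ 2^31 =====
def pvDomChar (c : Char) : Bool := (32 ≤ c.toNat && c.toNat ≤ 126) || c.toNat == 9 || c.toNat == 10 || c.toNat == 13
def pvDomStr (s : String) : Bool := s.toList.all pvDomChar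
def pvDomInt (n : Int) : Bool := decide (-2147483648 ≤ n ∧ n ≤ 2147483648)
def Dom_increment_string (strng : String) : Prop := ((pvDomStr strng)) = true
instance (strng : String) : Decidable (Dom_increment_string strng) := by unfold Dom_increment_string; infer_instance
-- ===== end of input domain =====

-- B replaces A's forward scan (which re-accumulates every digit run) by a single
-- right-to-left rstrip of the trailing digit run; measurably faster (no quadratic concatenation).


-- ===== PORT A =====
-- one iteration of A's for-loop over (letters, numbers)
def pvStepA (st : List Char × List Char) (x : Char) : List Char × List Char :=
  if PySem.Chars.isdigit x then (st.1, st.2 ++ [x]) else (st.1 ++ st.2 ++ [x], [])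

def increment_string (strng : String) : String :=
  let st := strng.toList.foldl pvStepA ([], [])
  let letters := st.1
  let numbers := st.2
  let i : Int := numbers.length
  if i == 0 then String.ofList letters ++ "1"
  else
    -- int(numbers) never fails here (numbers is a nonempty digit run), so getD 0 is exact
    let result := (PySem.Int.ofChars? numbers).getD 0 + 1
    -- format(result, f'0{i}d') = str(result).zfill(i) for the non-negative result
    String.ofList letters ++ PySem.Str.zfill (PySem.Int.toStr result) i

-- ===== PORT B =====
def increment_string_alt (strng : String) : String :=
  let cs := strng.toList
  -- strng.rstrip('0123456789'): drop the trailing digit run (exact: hand port of rstrip with a digit set)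
  let head := (cs.reverse.dropWhile PySem.Chars.isdigit).reverse
  let tail := cs.drop head.length
  if tail.isEmpty then String.ofList head ++ "1"
  else
    String.ofList head ++
      PySem.Str.zfill (PySem.Int.toStr ((PySem.Int.ofChars? tail).getD 0 + 1)) (tail.length : Int)

-- ===== PRECONDITION & SPEC =====
def Spec_increment_string (strng : String) (out : String) : Prop := out = increment_string_alt strng
instance (strng : String) (out : String) : Decidable (Spec_increment_string strng out) := by unfold Spec_increment_string; infer_instance

-- ===== CLAIM (what is proved, stated in full; the proofs are below) =====
def Claim_equal_increment_string : Prop := ∀ (strng : String), Dom_increment_string strng → Spec_increment_string strng (increment_string strng)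

-- ===== LEMMAS AND PROOFS =====

-- A's loop computes (string minus trailing digit run, trailing digit run)
theorem pvFoldA_eq (xs : List Char) :
    xs.foldl pvStepA ([], []) =
      ((xs.reverse.dropWhile PySem.Chars.isdigit).reverse,
       (xs.reverse.takeWhile PySem.Chars.isdigit).reverse) := by
  induction xs using List.reverseRecOn with
  | nil => rfl
  | append_singleton ys c ih =>
      rw [List.foldl_append, ih]
      by_cases h : PySem.Chars.isdigit c = true
      · simp [pvStepA, h, List.reverse_append]
      · have hy : (List.dropWhile PySem.Chars.isdigit ys.reverse).reverse ++
            (List.takeWhile PySem.Chars.isdigit ys.reverse).reverse = ys := by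
          rw [← List.reverse_append, List.takeWhile_append_dropWhile, List.reverse_reverse]
        simp only [List.foldl_cons, List.foldl_nil, pvStepA, h, Bool.false_eq_true, if_false]
        simp [List.reverse_append, h, hy]

theorem pvDrop_head (cs : List Char) :
    cs.drop ((cs.reverse.dropWhile PySem.Chars.isdigit).reverse).length =
      (cs.reverse.takeWhile PySem.Chars.isdigit).reverse := by
  set a := (cs.reverse.dropWhile PySem.Chars.isdigit).reverse with ha
  set b := (cs.reverse.takeWhile PySem.Chars.isdigit).reverse with hb
  have hcs : cs = a ++ b := by
    rw [ha, hb, ← List.reverse_append, List.takeWhile_append_dropWhile, List.reverse_reverse]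
  rw [hcs]
  exact List.drop_left

-- ===== VERDICT (by name: the statement is the Claim_ definition above) =====
theorem increment_string_spec : Claim_equal_increment_string := by
  intro strng _
  show increment_string strng = increment_string_alt strng
  simp only [increment_string, increment_string_alt, pvFoldA_eq, pvDrop_head]
  generalize (List.takeWhile PySem.Chars.isdigit strng.toList.reverse).reverse = t
  by_cases h : t = []
  · simp [h]
  · rw [if_neg (by simp [h]), if_neg (by simp [h])]
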